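-- pv_equiv track=rewrite | github.com/zulfatgaleev1990/Course_project_3 | src/utils.py | file_sort
-- ===== SOURCE A (Python) =====
-- def file_sort(data, operations):
--     '''
--     Функция, возвращающая, фильтрующая успешные операции и сортирующая (в обратном направлении)
--     '''
--     list_sort = sorted(data, reverse=True)
--     list_operation = []
--     for date_ in list_sort:
--         for operation in operations:
--             if operation.get('date') == date_ and operation.get('state') != 'CANCELED':
--                 list_operation.append(operation)
--     return list_operation
-- ===== SOURCE B (Python) =====
-- def file_sort(data, operations):
--     '''
--     Same result as A, but operations are grouped by date into a dict once,
--     so each date lookup is O(1) instead of a scan over all operations.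
--     '''
--     groups = {}
--     for op in operations:
--         if op.get('state') != 'CANCELED':
--             k = op.get('date')
--             if k is not None:
--                 groups.setdefault(k, []).append(op)
--     out = []
--     for date_ in sorted(data, reverse=True):
--         out.extend(groups.get(date_, []))
--     return out
-- ===== Notes on version B (the rewrite author's own statement) =====
-- stated objective: faster
-- what changed: B builds a date->operations dict of non-canceled operations in one pass and then concatenates the groups along the sorted dates, removing A's inner scan of all operations for every date.
import Mathlib
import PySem

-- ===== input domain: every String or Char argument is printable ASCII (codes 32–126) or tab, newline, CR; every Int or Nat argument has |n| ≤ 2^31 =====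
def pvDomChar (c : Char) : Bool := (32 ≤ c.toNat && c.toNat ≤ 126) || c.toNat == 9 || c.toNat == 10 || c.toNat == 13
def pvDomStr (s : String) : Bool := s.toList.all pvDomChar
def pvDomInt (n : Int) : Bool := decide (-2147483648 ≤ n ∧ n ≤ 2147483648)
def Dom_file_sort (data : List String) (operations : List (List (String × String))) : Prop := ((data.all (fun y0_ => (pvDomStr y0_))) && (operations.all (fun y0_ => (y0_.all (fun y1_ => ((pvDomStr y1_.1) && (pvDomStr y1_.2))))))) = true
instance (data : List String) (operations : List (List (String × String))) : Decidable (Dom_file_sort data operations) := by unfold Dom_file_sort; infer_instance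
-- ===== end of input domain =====

-- B groups the non-canceled operations by date into a dict in one pass, then concatenates
-- the groups along the sorted dates, instead of A's inner scan of all operations per date.

-- ===== PORT A =====
def file_sort (data : List String) (operations : List (List (String × String))) : List (List (String × String)) :=
  let list_sort := PySem.List.sorted data (fun x => x) true
  list_sort.foldl (fun list_operation date_ =>
    operations.foldl (fun acc operation =>
      if ((PySem.Dict.mk operation).get? "date" == some date_) &&
         !((PySem.Dict.mk operation).get? "state" == some "CANCELED")
      then acc ++ [operation] else acc) list_operation) []

-- ===== PORT B =====
def file_sort_altGroups (operations : List (List (String × String))) :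
    PySem.Dict String (List (List (String × String))) :=
  operations.foldl (fun groups op =>
    if !((PySem.Dict.mk op).get? "state" == some "CANCELED") then
      match (PySem.Dict.mk op).get? "date" with
      | some k => groups.modify k [] (· ++ [op])   -- setdefault(k, []).append(op)
      | none => groups
    else groups) PySem.Dict.empty

def file_sort_alt (data : List String) (operations : List (List (String × String))) : List (List (String × String)) :=
  let groups := file_sort_altGroups operations
  (PySem.List.sorted data (fun x => x) true).foldl
    (fun out date_ => out ++ groups.getD date_ []) []

-- ===== PRECONDITION & SPEC =====
def Spec_file_sort (data : List String) (operations : List (List (String × String))) (out : List (List (String × String))) : Prop := out = file_sort_alt data operations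
instance (data : List String) (operations : List (List (String × String))) (out : List (List (String × String))) : Decidable (Spec_file_sort data operations out) := by unfold Spec_file_sort; infer_instance

-- ===== CLAIM (what is proved, stated in full; the proofs are below) =====
def Claim_equal_file_sort : Prop := ∀ (data : List String) (operations : List (List (String × String))), Dom_file_sort data operations → Spec_file_sort data operations (file_sort data operations)

-- ===== LEMMAS AND PROOFS =====

-- the group stored under date `c` is exactly the ops A's inner loop keeps for `c`
theorem getD_altGroups (operations : List (List (String × String)))
    (d : PySem.Dict String (List (List (String × String)))) (c : String) :
    (operations.foldl (fun groups op =>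
      if !((PySem.Dict.mk op).get? "state" == some "CANCELED") then
        match (PySem.Dict.mk op).get? "date" with
        | some k => groups.modify k [] (· ++ [op])
        | none => groups
      else groups) d).getD c []
    = d.getD c [] ++ operations.filter (fun op =>
        ((PySem.Dict.mk op).get? "date" == some c) &&
        !((PySem.Dict.mk op).get? "state" == some "CANCELED")) := by
  induction operations generalizing d with
  | nil => simp
  | cons op rest ih =>
    simp only [List.foldl_cons, List.filter_cons]
    by_cases hs : ((PySem.Dict.mk op).get? "state" == some "CANCELED") = true
    · rw [if_neg (by simp [hs]), ih]
      simp [hs]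
    · simp only [Bool.not_eq_true] at hs
      rw [if_pos (by simp [hs])]
      rcases hd : (PySem.Dict.mk op).get? "date" with _ | k
      · rw [ih]
        simp [hs]
      · rw [show (match some k with
            | some k => d.modify k [] (· ++ [op])
            | none => d) = d.modify k [] (· ++ [op]) from rfl, ih]
        by_cases hc : c = k
        · subst hc
          rw [PySem.Dict.getD_modify_self]
          simp [hs]
        · rw [PySem.Dict.getD_modify_of_ne (hne := by simpa using hc)]
          simp [hs, Ne.symm hc]

-- ===== VERDICT (by name: the statement is the Claim_ definition above) =====
theorem file_sort_spec : Claim_equal_file_sort := by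
  intro data operations _
  unfold Spec_file_sort file_sort file_sort_alt file_sort_altGroups
  refine PySem.List.foldl_congr_mem _ _ _ _ (fun acc date_ _ => ?_)
  rw [PySem.List.foldl_append_if, getD_altGroups]
  simp [PySem.Dict.getD_empty]
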